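-- pv_equiv track=rewrite | github.com/Zekai-Zhao775/LeetCode | LeetCode/2021. Brightest Position on Street.py | brightestPosition
-- ===== SOURCE A (Python) =====
-- from typing import List
--
-- def brightestPosition(lights: List[List[int]]) -> int:
--     # edge case
--     if len(lights) == 1:
--         return lights[0][0] - lights[0][1]
--     start = []
--     end = []
--     for light in lights:
--         start.append(light[0] - light[1])
--         end.append(light[0] + light[1])
--     start.sort()
--     end.sort()
--
--     brightness = 0
--     brightness_max = 0
--     brightness_max_position = 0
--
--     i = 0
--     j = 0
--     while i < len(start):
--         if j >= len(end):
--             brightness += 1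
--             if brightness > brightness_max:
--                 brightness_max = brightness
--                 brightness_max_position = start[i]
--         elif start[i] <= end[j]:
--             brightness += 1
--             while i < len(start) - 1 and start[i] == start[i + 1]:
--                 brightness += 1
--                 i += 1
--             if brightness > brightness_max:
--                 brightness_max = brightness
--                 brightness_max_position = start[i]
--             while j < len(end) and start[i] == end[j]:
--                 j += 1
--                 brightness -= 1
--         elif start[i] > end[j]:
--             while j < len(end) and start[i] > end[j]:
--                 j += 1
--                 brightness -= 1
--             brightness += 1
--             while i < len(start) - 1 and start[i] == start[i + 1]:
--                 brightness += 1
--                 i += 1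
--             if brightness > brightness_max:
--                 brightness_max = brightness
--                 brightness_max_position = start[i]
--             while j < len(end) and start[i] == end[j]:
--                 j += 1
--                 brightness -= 1
--
--         i += 1
--
--     return brightness_max_position
-- ===== SOURCE B (Python) =====
-- from typing import List
--
-- def brightestPosition(lights: List[List[int]]) -> int:
--     best = 0
--     pos = 0
--     for s in sorted({light[0] - light[1] for light in lights}):
--         b = sum(1 for light in lights if light[0] - light[1] <= s) \
--           - sum(1 for light in lights if light[0] + light[1] < s)
--         if b > best:
--             best = b
--             pos = s
--     return pos
-- ===== Notes on version B (the rewrite author's own statement) =====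
-- stated objective: simpler
-- what changed: Replaces A's special-cased two-pointer merge over separately sorted start/end arrays (with three branches and nested dup/pop inner loops) by a direct scan over the sorted distinct start positions, computing the brightness at each position by counting lights whose interval has begun and subtracting those already ended; Pre_ excludes lights with fewer than 2 entries (A raises IndexError) and malformed single-light inputs with a negative range, where A's len==1 shortcut answers l-r for an empty interval while its own general sweep (and B) would answer 0.
-- outside the precondition, e.g. on brightestPosition([[0, -1]]): A returns 1, B returns 0; on brightestPosition([[3, -3]]): A returns 6, B returns 0
import Mathlib
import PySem

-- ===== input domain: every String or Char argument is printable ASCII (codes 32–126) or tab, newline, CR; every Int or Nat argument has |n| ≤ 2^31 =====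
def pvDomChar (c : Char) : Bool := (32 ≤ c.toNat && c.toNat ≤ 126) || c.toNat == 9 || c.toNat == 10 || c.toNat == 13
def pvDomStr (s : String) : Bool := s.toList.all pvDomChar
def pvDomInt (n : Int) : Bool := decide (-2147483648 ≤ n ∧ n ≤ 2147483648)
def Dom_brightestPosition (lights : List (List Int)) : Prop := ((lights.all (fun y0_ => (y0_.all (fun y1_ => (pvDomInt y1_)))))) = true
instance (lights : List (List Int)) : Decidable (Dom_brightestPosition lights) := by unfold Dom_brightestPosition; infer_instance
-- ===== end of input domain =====

-- B replaces A's two-pointer merge over the two sorted endpoint arrays by a plain scan of the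
-- sorted distinct start positions with a counting formula per position (simpler, not faster).

-- ===== PORT A =====

-- inner while: while i < len(start)-1 and start[i] == start[i+1]: brightness += 1; i += 1
def pvSkipDups (v : Int) (rest : List Int) (b : Int) : List Int × Int :=
  match rest with
  | [] => ([], b)
  | w :: t => if w = v then pvSkipDups v t (b + 1) else (w :: t, b)

-- inner while: while j < len(end) and start[i] > end[j]: j += 1; brightness -= 1
def pvPopLt (v : Int) (re : List Int) (b : Int) : List Int × Int :=
  match re with
  | [] => ([], b)
  | e :: t => if v > e then pvPopLt v t (b - 1) else (e :: t, b)

-- inner while: while j < len(end) and start[i] == end[j]: j += 1; brightness -= 1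
def pvPopEq (v : Int) (re : List Int) (b : Int) : List Int × Int :=
  match re with
  | [] => ([], b)
  | e :: t => if v = e then pvPopEq v t (b - 1) else (e :: t, b)

-- used by pvLoopA's termination proof
lemma pvSkipDups_fst_length_le (v : Int) : ∀ (rest : List Int) (b : Int),
    (pvSkipDups v rest b).1.length ≤ rest.length := by
  intro rest
  induction rest with
  | nil => intro b; simp [pvSkipDups]
  | cons w t ih =>
    intro b
    by_cases h : w = v
    · simpa [pvSkipDups, h] using Nat.le_succ_of_le (ih (b + 1))
    · simp [pvSkipDups, h]

-- the outer while loop of A; i/j are represented by the remaining suffixes of start/end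
def pvLoopA (S E : List Int) (b bm pos : Int) : Int :=
  match S with
  | [] => pos
  | v :: rest =>
    match E with
    | [] =>
      -- j >= len(end)
      pvLoopA rest [] (b + 1) (if b + 1 > bm then b + 1 else bm) (if b + 1 > bm then v else pos)
    | e :: re =>
      if v ≤ e then
        -- start[i] <= end[j]
        let p := pvSkipDups v rest (b + 1)
        let q := pvPopEq v (e :: re) p.2
        pvLoopA p.1 q.1 q.2 (if p.2 > bm then p.2 else bm) (if p.2 > bm then v else pos)
      else
        -- start[i] > end[j]
        let r := pvPopLt v (e :: re) b
        let p := pvSkipDups v rest (r.2 + 1)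
        let q := pvPopEq v r.1 p.2
        pvLoopA p.1 q.1 q.2 (if p.2 > bm then p.2 else bm) (if p.2 > bm then v else pos)
termination_by S.length
decreasing_by
  · simp only [List.length_cons]
    exact Nat.lt_succ_of_le (Nat.le_refl _)
  · simp only [List.length_cons]
    exact Nat.lt_succ_of_le (pvSkipDups_fst_length_le v rest (b + 1))
  · simp only [List.length_cons]
    exact Nat.lt_succ_of_le (pvSkipDups_fst_length_le v rest ((pvPopLt v (e :: re) b).2 + 1))

def brightestPosition (lights : List (List Int)) : Int :=
  if lights.length = 1 then
    PySem.List.pyGetD (PySem.List.pyGetD lights 0 []) 0 0 -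
      PySem.List.pyGetD (PySem.List.pyGetD lights 0 []) 1 0
  else
    let se := lights.foldl
      (fun (acc : List Int × List Int) light =>
        (acc.1 ++ [PySem.List.pyGetD light 0 0 - PySem.List.pyGetD light 1 0],
         acc.2 ++ [PySem.List.pyGetD light 0 0 + PySem.List.pyGetD light 1 0]))
      ([], [])
    pvLoopA (PySem.List.sorted se.1 (fun x => x) false)
            (PySem.List.sorted se.2 (fun x => x) false) 0 0 0

-- ===== PORT B =====
def brightestPosition_alt (lights : List (List Int)) : Int :=
  let keys := PySem.Set.ofList
    (lights.map (fun light => PySem.List.pyGetD light 0 0 - PySem.List.pyGetD light 1 0))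
  let res := (PySem.List.sorted keys (fun x => x) false).foldl
    (fun (st : Int × Int) s =>
      let bc : Int :=
        ((lights.countP (fun light =>
            PySem.List.pyGetD light 0 0 - PySem.List.pyGetD light 1 0 ≤ s)) : Int) -
        ((lights.countP (fun light =>
            PySem.List.pyGetD light 0 0 + PySem.List.pyGetD light 1 0 < s)) : Int)
      if bc > st.1 then (bc, s) else st)
    ((0 : Int), (0 : Int))
  res.2

-- ===== PRECONDITION & SPEC =====
-- Pre_ excludes inputs on which A raises IndexError (a light with fewer than 2 entries) and, for
-- single-light inputs only, a malformed negative range (a light illuminates positions l-r..l+r, so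
-- ranges are nonnegative in the task's domain): there A's len==1 shortcut answers l-r for an empty
-- interval while A's own general sweep (and B) would answer 0, so no answer is specified; on
-- multi-light inputs A and B agree even with negative ranges, so those stay admitted.
def Pre_brightestPosition (lights : List (List Int)) : Prop :=
  (∀ light ∈ lights, 2 ≤ light.length) ∧
    (lights.length = 1 → 0 ≤ (lights.headD []).getD 1 0)
instance (lights : List (List Int)) : Decidable (Pre_brightestPosition lights) := by
  unfold Pre_brightestPosition; infer_instance

def pvWitness_brightestPosition : List (List Int) := [[0, 2], [3, 1]]

def Spec_brightestPosition (lights : List (List Int)) (out : Int) : Prop :=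
  out = brightestPosition_alt lights
instance (lights : List (List Int)) (out : Int) : Decidable (Spec_brightestPosition lights out) := by
  unfold Spec_brightestPosition; infer_instance

-- ===== CLAIM (what is proved, stated in full; the proofs are below) =====
def Claim_equal_brightestPosition : Prop := ∀ (lights : List (List Int)), Dom_brightestPosition lights → Pre_brightestPosition lights → Spec_brightestPosition lights (brightestPosition lights)

-- ===== LEMMAS AND PROOFS =====
-- f(u): brightness at position u = (#starts ≤ u) − (#ends < u), over the unsorted endpoint lists
def pvF (S0 E0 : List Int) (u : Int) : Int :=
  ((S0.countP (fun s => decide (s ≤ u))) : Int) - ((E0.countP (fun e => decide (e < u))) : Int)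

-- one strict-max update of the (best, position) state, as B performs it
def pvStep (S0 E0 : List Int) (st : Int × Int) (u : Int) : Int × Int :=
  if pvF S0 E0 u > st.1 then (pvF S0 E0 u, u) else st

lemma pvSkipDups_spec (v : Int) : ∀ (rest : List Int) (b : Int),
    pvSkipDups v rest b =
      (rest.dropWhile (fun w => decide (w = v)),
       b + ((rest.takeWhile (fun w => decide (w = v))).length : Int)) := by
  intro rest
  induction rest with
  | nil => intro b; simp [pvSkipDups]
  | cons w t ih =>
    intro b
    by_cases h : w = v
    · subst h
      simp only [pvSkipDups, ih, List.dropWhile_cons, List.takeWhile_cons]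
      simp only [decide_true, if_true, List.length_cons]
      exact congrArg _ (by push_cast; ring)
    · simp [pvSkipDups, h]

lemma pvPopLt_spec (v : Int) : ∀ (re : List Int) (b : Int),
    pvPopLt v re b =
      (re.dropWhile (fun e => decide (e < v)),
       b - ((re.takeWhile (fun e => decide (e < v))).length : Int)) := by
  intro re
  induction re with
  | nil => intro b; simp [pvPopLt]
  | cons e t ih =>
    intro b
    by_cases h : e < v
    · simp only [pvPopLt, gt_iff_lt, List.dropWhile_cons, List.takeWhile_cons, h, ih]
      simp only [decide_true, if_true, List.length_cons]
      exact congrArg _ (by push_cast; ring)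
    · simp [pvPopLt, h]

lemma pvPopEq_spec (v : Int) : ∀ (re : List Int) (b : Int),
    pvPopEq v re b =
      (re.dropWhile (fun e => decide (v = e)),
       b - ((re.takeWhile (fun e => decide (v = e))).length : Int)) := by
  intro re
  induction re with
  | nil => intro b; simp [pvPopEq]
  | cons e t ih =>
    intro b
    by_cases h : v = e
    · subst h
      simp only [pvPopEq, ih, List.dropWhile_cons, List.takeWhile_cons]
      simp only [decide_true, if_true, List.length_cons]
      exact congrArg _ (by push_cast; ring)
    · simp [pvPopEq, h]

-- on a sorted list, a downward-closed predicate holds exactly on the takeWhile prefix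
lemma pv_takeWhile_length_eq_countP (p : Int → Bool) :
    ∀ (E : List Int), E.Pairwise (· ≤ ·) →
      (∀ x ∈ E, ∀ y ∈ E, x ≤ y → p y = true → p x = true) →
      (E.takeWhile p).length = E.countP p := by
  intro E
  induction E with
  | nil => simp
  | cons e t ih =>
    intro hp hdc
    rcases List.pairwise_cons.1 hp with ⟨hhead, ht⟩
    by_cases h : p e = true
    · have h1 : (e :: t).countP p = t.countP p + 1 := List.countP_cons_of_pos h
      rw [List.takeWhile_cons_of_pos h, List.length_cons, h1,
        ih ht (fun x hx y hy => hdc x (List.mem_cons_of_mem _ hx) y (List.mem_cons_of_mem _ hy))]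
    · have h0 : t.countP p = 0 := by
        apply List.countP_eq_zero.2
        intro y hy hc
        exact h (hdc e (List.mem_cons_self) y (List.mem_cons_of_mem _ hy) (hhead y hy) hc)
      have h1 : (e :: t).countP p = t.countP p := List.countP_cons_of_neg (by simpa using h)
      rw [List.takeWhile_cons_of_neg (by simpa using h), h1, h0]
      rfl

lemma pv_mem_dropWhile_not (p : Int → Bool) :
    ∀ (E : List Int), E.Pairwise (· ≤ ·) →
      (∀ x ∈ E, ∀ y ∈ E, x ≤ y → p y = true → p x = true) →
      ∀ x ∈ E.dropWhile p, p x = false := by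
  intro E
  induction E with
  | nil => simp
  | cons e t ih =>
    intro hp hdc x hx
    rcases List.pairwise_cons.1 hp with ⟨hhead, ht⟩
    by_cases h : p e = true
    · rw [List.dropWhile_cons_of_pos h] at hx
      exact ih ht (fun a ha y hy => hdc a (List.mem_cons_of_mem _ ha) y (List.mem_cons_of_mem _ hy)) x hx
    · rw [List.dropWhile_cons_of_neg (by simpa using h)] at hx
      rcases List.mem_cons.1 hx with rfl | hx'
      · simpa using h
      · by_contra hc
        exact h (hdc e (List.mem_cons_self) x (List.mem_cons_of_mem _ hx') (hhead x hx')
          (by simpa using hc))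

lemma pv_countP_split (q p : Int → Bool) (E : List Int) :
    E.countP q = (E.takeWhile p).countP q + (E.dropWhile p).countP q := by
  conv_lhs => rw [← List.takeWhile_append_dropWhile (p := p) (l := E)]
  exact List.countP_append

-- a pre-update with a smaller-or-equal candidate at the same position is absorbed by the real update
lemma pvStep_absorb (S0 E0 : List Int) (bm pos b v : Int) (h : b + 1 ≤ pvF S0 E0 v) :
    pvStep S0 E0 ((if b + 1 > bm then b + 1 else bm), (if b + 1 > bm then v else pos)) v
      = pvStep S0 E0 (bm, pos) v := by
  unfold pvStep
  by_cases h1 : b + 1 > bm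
  · rw [if_pos h1, if_pos h1]
    by_cases h2 : pvF S0 E0 v > b + 1
    · rw [if_pos h2, if_pos (by omega)]
    · have h3 : pvF S0 E0 v = b + 1 := by omega
      rw [if_neg h2, if_pos (by omega)]
      simp [h3]
  · rw [if_neg h1, if_neg h1]

lemma pv_D_head (v : Int) (rest D : List Int)
    (hS : (v :: rest).Pairwise (· ≤ ·)) (hD : D.Pairwise (· < ·))
    (hmem : ∀ x, x ∈ D ↔ x ∈ (v :: rest)) : ∃ D', D = v :: D' := by
  cases D with
  | nil => exact absurd ((hmem v).2 (List.mem_cons_self)) (by simp)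
  | cons d D' =>
    have hdS : d ∈ (v :: rest) := (hmem d).1 (List.mem_cons_self)
    have hvd : v ≤ d := by
      rcases List.mem_cons.1 hdS with h | h
      · omega
      · exact (List.pairwise_cons.1 hS).1 d h
    rcases List.mem_cons.1 ((hmem v).2 (List.mem_cons_self)) with h | h
    · exact ⟨D', by rw [h]⟩
    · have : d < v := (List.pairwise_cons.1 hD).1 v h
      omega

-- processing one group of equal start values (the common tail of A's two nonempty-E branches)
lemma pvGroup (S0 E0 : List Int) (n : Nat)
    (ih : ∀ (S E D : List Int) (b bm pos : Int), S.length ≤ n →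
      S.Pairwise (· ≤ ·) → E.Pairwise (· ≤ ·) → D.Pairwise (· < ·) →
      (∀ x, x ∈ D ↔ x ∈ S) →
      (∀ u ∈ S, b + ((S.countP (fun s => decide (s ≤ u))) : Int)
          - ((E.countP (fun e => decide (e < u))) : Int) = pvF S0 E0 u) →
      pvLoopA S E b bm pos = (D.foldl (pvStep S0 E0) (bm, pos)).2)
    (v : Int) (rest E1 D : List Int) (b1 bm pos : Int)
    (hlen : rest.length ≤ n)
    (hS : (v :: rest).Pairwise (· ≤ ·)) (hE1 : E1.Pairwise (· ≤ ·))
    (hge : ∀ x ∈ E1, v ≤ x)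
    (hD : D.Pairwise (· < ·)) (hmem : ∀ x, x ∈ D ↔ x ∈ (v :: rest))
    (hinv : ∀ u ∈ (v :: rest), b1 + (((v :: rest).countP (fun s => decide (s ≤ u))) : Int)
        - ((E1.countP (fun e => decide (e < u))) : Int) = pvF S0 E0 u) :
    pvLoopA (rest.dropWhile (fun w => decide (w = v)))
            (E1.dropWhile (fun e => decide (v = e)))
            (b1 + 1 + ((rest.takeWhile (fun w => decide (w = v))).length : Int)
              - ((E1.takeWhile (fun e => decide (v = e))).length : Int))
            (if b1 + 1 + ((rest.takeWhile (fun w => decide (w = v))).length : Int) > bm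
              then b1 + 1 + ((rest.takeWhile (fun w => decide (w = v))).length : Int) else bm)
            (if b1 + 1 + ((rest.takeWhile (fun w => decide (w = v))).length : Int) > bm
              then v else pos)
      = (D.foldl (pvStep S0 E0) (bm, pos)).2 := by
  obtain ⟨D', rfl⟩ := pv_D_head v rest D hS hD hmem
  have hvrest : ∀ x ∈ rest, v ≤ x := (List.pairwise_cons.1 hS).1
  have hrest : rest.Pairwise (· ≤ ·) := (List.pairwise_cons.1 hS).2
  have hdcS : ∀ x ∈ rest, ∀ y ∈ rest, x ≤ y →
      (fun w => decide (w = v)) y = true → (fun w => decide (w = v)) x = true := by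
    intro x hx y _ hxy hyv
    have h1 : y = v := by simpa using hyv
    have h2 := hvrest x hx
    simp only [decide_eq_true_eq]
    omega
  have hdcE : ∀ x ∈ E1, ∀ y ∈ E1, x ≤ y →
      (fun e => decide (v = e)) y = true → (fun e => decide (v = e)) x = true := by
    intro x hx y _ hxy hyv
    have h1 : v = y := by simpa using hyv
    have h2 := hge x hx
    simp only [decide_eq_true_eq]
    omega
  have hts_len : (rest.takeWhile (fun w => decide (w = v))).length
      = rest.countP (fun w => decide (w = v)) :=
    pv_takeWhile_length_eq_countP _ rest hrest hdcS
  have hte_len : (E1.takeWhile (fun e => decide (v = e))).length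
      = E1.countP (fun e => decide (v = e)) :=
    pv_takeWhile_length_eq_countP _ E1 hE1 hdcE
  have hds_sub := List.dropWhile_sublist (l := rest) (fun w => decide (w = v))
  have hde_sub := List.dropWhile_sublist (l := E1) (fun e => decide (v = e))
  have hds_mem : ∀ x ∈ rest.dropWhile (fun w => decide (w = v)), x ∈ rest :=
    fun x hx => hds_sub.subset hx
  have hds_gt : ∀ x ∈ rest.dropWhile (fun w => decide (w = v)), v < x := by
    intro x hx
    have h1 := pv_mem_dropWhile_not _ rest hrest hdcS x hx
    have h2 := hvrest x (hds_mem x hx)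
    simp only [decide_eq_false_iff_not] at h1
    omega
  -- the recorded candidate is pvF at v
  have hE1ltv : E1.countP (fun e => decide (e < v)) = 0 := by
    apply List.countP_eq_zero.2
    intro a ha
    have := hge a ha
    simp only [decide_eq_true_eq]
    omega
  have hcnt_le_v : rest.countP (fun s => decide (s ≤ v))
      = (rest.takeWhile (fun w => decide (w = v))).length := by
    have hsplit := pv_countP_split (fun s => decide (s ≤ v)) (fun w => decide (w = v)) rest
    have h1 : (rest.takeWhile (fun w => decide (w = v))).countP (fun s => decide (s ≤ v))
        = (rest.takeWhile (fun w => decide (w = v))).length := by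
      apply List.countP_eq_length.2
      intro a ha
      have := List.mem_takeWhile_imp ha
      simp only [decide_eq_true_eq] at this ⊢
      omega
    have h2 : (rest.dropWhile (fun w => decide (w = v))).countP (fun s => decide (s ≤ v)) = 0 := by
      apply List.countP_eq_zero.2
      intro a ha
      have := hds_gt a ha
      simp only [decide_eq_true_eq]
      omega
    omega
  have hfv : pvF S0 E0 v
      = b1 + 1 + ((rest.takeWhile (fun w => decide (w = v))).length : Int) := by
    have h0 := hinv v (List.mem_cons_self)
    have hone : (v :: rest).countP (fun s => decide (s ≤ v))
        = rest.countP (fun s => decide (s ≤ v)) + 1 := List.countP_cons_of_pos (by simp)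
    rw [hone, hE1ltv, hcnt_le_v] at h0
    push_cast at h0 ⊢
    omega
  have hmem' : ∀ x, x ∈ D' ↔ x ∈ rest.dropWhile (fun w => decide (w = v)) := by
    intro x
    constructor
    · intro hx
      have hvx : v < x := (List.pairwise_cons.1 hD).1 x hx
      have hxS : x ∈ v :: rest := (hmem x).1 (List.mem_cons_of_mem _ hx)
      have hxrest : x ∈ rest := by
        rcases List.mem_cons.1 hxS with h | h
        · omega
        · exact h
      have hsplitmem : x ∈ rest.takeWhile (fun w => decide (w = v))
          ++ rest.dropWhile (fun w => decide (w = v)) := by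
        rw [List.takeWhile_append_dropWhile]; exact hxrest
      rcases List.mem_append.1 hsplitmem with h | h
      · have := List.mem_takeWhile_imp h
        simp only [decide_eq_true_eq] at this
        omega
      · exact h
    · intro hx
      have hxD : x ∈ v :: D' := (hmem x).2 (List.mem_cons_of_mem _ (hds_mem x hx))
      rcases List.mem_cons.1 hxD with h | h
      · have := hds_gt x hx; omega
      · exact h
  have hinv' : ∀ u ∈ rest.dropWhile (fun w => decide (w = v)),
      (b1 + 1 + ((rest.takeWhile (fun w => decide (w = v))).length : Int)
          - ((E1.takeWhile (fun e => decide (v = e))).length : Int))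
        + (((rest.dropWhile (fun w => decide (w = v))).countP (fun s => decide (s ≤ u))) : Int)
        - (((E1.dropWhile (fun e => decide (v = e))).countP (fun e => decide (e < u))) : Int)
      = pvF S0 E0 u := by
    intro u hu
    have hvu : v < u := hds_gt u hu
    have hurest : u ∈ rest := hds_mem u hu
    have h0 := hinv u (List.mem_cons_of_mem _ hurest)
    have hone : (v :: rest).countP (fun s => decide (s ≤ u))
        = rest.countP (fun s => decide (s ≤ u)) + 1 :=
      List.countP_cons_of_pos (by simp only [decide_eq_true_eq]; omega)
    have hsplitS := pv_countP_split (fun s => decide (s ≤ u)) (fun w => decide (w = v)) rest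
    have htsfull : (rest.takeWhile (fun w => decide (w = v))).countP (fun s => decide (s ≤ u))
        = (rest.takeWhile (fun w => decide (w = v))).length := by
      apply List.countP_eq_length.2
      intro a ha
      have := List.mem_takeWhile_imp ha
      simp only [decide_eq_true_eq] at this ⊢
      omega
    have hsplitE := pv_countP_split (fun e => decide (e < u)) (fun e => decide (v = e)) E1
    have htefull : (E1.takeWhile (fun e => decide (v = e))).countP (fun e => decide (e < u))
        = (E1.takeWhile (fun e => decide (v = e))).length := by
      apply List.countP_eq_length.2
      intro a ha
      have := List.mem_takeWhile_imp ha
      simp only [decide_eq_true_eq] at this ⊢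
      omega
    rw [hone, hsplitS, htsfull, hsplitE, htefull] at h0
    push_cast at h0 ⊢
    omega
  have hcall := ih (rest.dropWhile (fun w => decide (w = v)))
      (E1.dropWhile (fun e => decide (v = e))) D'
      (b1 + 1 + ((rest.takeWhile (fun w => decide (w = v))).length : Int)
        - ((E1.takeWhile (fun e => decide (v = e))).length : Int))
      (if b1 + 1 + ((rest.takeWhile (fun w => decide (w = v))).length : Int) > bm
        then b1 + 1 + ((rest.takeWhile (fun w => decide (w = v))).length : Int) else bm)
      (if b1 + 1 + ((rest.takeWhile (fun w => decide (w = v))).length : Int) > bm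
        then v else pos)
      (le_trans hds_sub.length_le hlen)
      (hrest.sublist hds_sub) (hE1.sublist hde_sub)
      ((List.pairwise_cons.1 hD).2) hmem' hinv'
  rw [hcall, List.foldl_cons]
  have hinit : ((if b1 + 1 + ((rest.takeWhile (fun w => decide (w = v))).length : Int) > bm
        then b1 + 1 + ((rest.takeWhile (fun w => decide (w = v))).length : Int) else bm),
      (if b1 + 1 + ((rest.takeWhile (fun w => decide (w = v))).length : Int) > bm
        then v else pos)) = pvStep S0 E0 (bm, pos) v := by
    simp only [pvStep]
    rw [← hfv]
    split_ifs <;> rfl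
  rw [hinit]

-- A's outer loop, started on the sorted endpoint lists with a valid brightness accounting,
-- performs exactly B's strict-max scan over the distinct start values
lemma pvLoopA_eq (S0 E0 : List Int) : ∀ (n : Nat) (S E D : List Int) (b bm pos : Int),
    S.length ≤ n →
    S.Pairwise (· ≤ ·) → E.Pairwise (· ≤ ·) → D.Pairwise (· < ·) →
    (∀ x, x ∈ D ↔ x ∈ S) →
    (∀ u ∈ S, b + ((S.countP (fun s => decide (s ≤ u))) : Int)
        - ((E.countP (fun e => decide (e < u))) : Int) = pvF S0 E0 u) →
    pvLoopA S E b bm pos = (D.foldl (pvStep S0 E0) (bm, pos)).2 := by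
  intro n
  induction n with
  | zero =>
    intro S E D b bm pos hlen _ _ _ hmem _
    have hS : S = [] := by simpa using List.length_eq_zero_iff.1 (Nat.le_zero.1 hlen)
    subst hS
    have hD : D = [] := by
      cases D with
      | nil => rfl
      | cons d D' => exact absurd ((hmem d).1 (List.mem_cons_self)) (by simp)
    subst hD
    simp [pvLoopA]
  | succ n ihn =>
    intro S E D b bm pos hlen hS hE hD hmem hinv
    cases S with
    | nil =>
      have hDnil : D = [] := by
        cases D with
        | nil => rfl
        | cons d D' => exact absurd ((hmem d).1 (List.mem_cons_self)) (by simp)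
      subst hDnil
      simp [pvLoopA]
    | cons v rest =>
      have hlen' : rest.length ≤ n := by simpa using hlen
      have hvrest : ∀ x ∈ rest, v ≤ x := (List.pairwise_cons.1 hS).1
      have hrest : rest.Pairwise (· ≤ ·) := (List.pairwise_cons.1 hS).2
      cases E with
      | nil =>
        obtain ⟨D', rfl⟩ := pv_D_head v rest D hS hD hmem
        rw [pvLoopA]
        have hinv' : ∀ u ∈ rest, (b + 1) + ((rest.countP (fun s => decide (s ≤ u))) : Int)
            - ((([] : List Int).countP (fun e => decide (e < u))) : Int) = pvF S0 E0 u := by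
          intro u hu
          have h0 := hinv u (List.mem_cons_of_mem _ hu)
          have hone : (v :: rest).countP (fun s => decide (s ≤ u))
              = rest.countP (fun s => decide (s ≤ u)) + 1 :=
            List.countP_cons_of_pos (by simpa using hvrest u hu)
          rw [hone] at h0
          push_cast at h0 ⊢
          omega
        by_cases hv : v ∈ rest
        · -- value v occurs again: the update here is absorbed by the group's final update
          have hmem' : ∀ x, x ∈ v :: D' ↔ x ∈ rest := by
            intro x
            rw [hmem x]
            constructor
            · intro hx
              rcases List.mem_cons.1 hx with rfl | h
              · exact hv
              · exact h
            · exact fun h => List.mem_cons_of_mem _ h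
          rw [ihn rest [] (v :: D') (b + 1)
              (if b + 1 > bm then b + 1 else bm) (if b + 1 > bm then v else pos)
              hlen' hrest (List.Pairwise.nil) hD hmem' hinv']
          rw [List.foldl_cons, List.foldl_cons]
          have habs : b + 1 ≤ pvF S0 E0 v := by
            have h0 := hinv v (List.mem_cons_self)
            have hone : (v :: rest).countP (fun s => decide (s ≤ v))
                = rest.countP (fun s => decide (s ≤ v)) + 1 := List.countP_cons_of_pos (by simp)
            have hposc : rest.countP (fun s => decide (s ≤ v)) ≠ 0 := fun hz =>
              by simpa using List.countP_eq_zero.1 hz v hv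
            rw [hone, List.countP_nil] at h0
            push_cast at h0
            omega
          rw [pvStep_absorb S0 E0 bm pos b v habs]
        · -- v is the whole group: a single update with pvF v = b + 1
          have hmem' : ∀ x, x ∈ D' ↔ x ∈ rest := by
            intro x
            constructor
            · intro hx
              have hvx : v < x := (List.pairwise_cons.1 hD).1 x hx
              rcases List.mem_cons.1 ((hmem x).1 (List.mem_cons_of_mem _ hx)) with h | h
              · omega
              · exact h
            · intro hx
              rcases List.mem_cons.1 ((hmem x).2 (List.mem_cons_of_mem _ hx)) with h | h
              · exact absurd (h ▸ hx) hv
              · exact h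
          have hfv : pvF S0 E0 v = b + 1 := by
            have h0 := hinv v (List.mem_cons_self)
            have hone : (v :: rest).countP (fun s => decide (s ≤ v))
                = rest.countP (fun s => decide (s ≤ v)) + 1 := List.countP_cons_of_pos (by simp)
            have hz : rest.countP (fun s => decide (s ≤ v)) = 0 := by
              apply List.countP_eq_zero.2
              intro a ha
              have h1 := hvrest a ha
              have h2 : a ≠ v := fun hav => hv (hav ▸ ha)
              simp only [decide_eq_true_eq]
              omega
            rw [hone, hz, List.countP_nil] at h0
            push_cast at h0
            omega
          rw [ihn rest [] D' (b + 1)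
              (if b + 1 > bm then b + 1 else bm) (if b + 1 > bm then v else pos)
              hlen' hrest (List.Pairwise.nil) ((List.pairwise_cons.1 hD).2) hmem' hinv']
          rw [List.foldl_cons]
          have hinit : ((if b + 1 > bm then b + 1 else bm), (if b + 1 > bm then v else pos))
              = pvStep S0 E0 (bm, pos) v := by
            simp only [pvStep]
            rw [hfv]
            split_ifs <;> rfl
          rw [hinit]
      | cons e re =>
        rw [pvLoopA]
        by_cases hce : v ≤ e
        · rw [if_pos hce]
          have hge : ∀ x ∈ (e :: re), v ≤ x := by
            intro x hx
            rcases List.mem_cons.1 hx with rfl | h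
            · exact hce
            · exact le_trans hce ((List.pairwise_cons.1 hE).1 x h)
          simp only [pvSkipDups_spec, pvPopEq_spec]
          exact pvGroup S0 E0 n ihn v rest (e :: re) D b bm pos hlen' hS hE hge hD hmem hinv
        · rw [if_neg hce]
          have hdcL : ∀ x ∈ (e :: re), ∀ y ∈ (e :: re), x ≤ y →
              (fun x => decide (x < v)) y = true → (fun x => decide (x < v)) x = true := by
            intro x _ y _ hxy hyv
            simp only [decide_eq_true_eq] at hyv ⊢
            omega
          have htl_len : ((e :: re).takeWhile (fun x => decide (x < v))).length
              = (e :: re).countP (fun x => decide (x < v)) :=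
            pv_takeWhile_length_eq_countP _ _ hE hdcL
          have hE1_sub := List.dropWhile_sublist (l := e :: re) (fun x => decide (x < v))
          have hge : ∀ x ∈ (e :: re).dropWhile (fun x => decide (x < v)), v ≤ x := by
            intro x hx
            have := pv_mem_dropWhile_not _ _ hE hdcL x hx
            simp only [decide_eq_false_iff_not] at this
            omega
          have hinv' : ∀ u ∈ (v :: rest),
              (b - (((e :: re).takeWhile (fun x => decide (x < v))).length : Int))
                + (((v :: rest).countP (fun s => decide (s ≤ u))) : Int)
                - ((((e :: re).dropWhile (fun x => decide (x < v))).countP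
                    (fun x => decide (x < u))) : Int) = pvF S0 E0 u := by
            intro u hu
            have hvu : v ≤ u := by
              rcases List.mem_cons.1 hu with rfl | h
              · omega
              · exact hvrest u h
            have h0 := hinv u hu
            have hsplit := pv_countP_split (fun x => decide (x < u)) (fun x => decide (x < v)) (e :: re)
            have htlfull : ((e :: re).takeWhile (fun x => decide (x < v))).countP (fun x => decide (x < u))
                = ((e :: re).takeWhile (fun x => decide (x < v))).length := by
              apply List.countP_eq_length.2
              intro a ha
              have := List.mem_takeWhile_imp ha
              simp only [decide_eq_true_eq] at this ⊢
              omega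
            rw [hsplit, htlfull] at h0
            push_cast at h0 ⊢
            omega
          simp only [pvPopLt_spec, pvSkipDups_spec, pvPopEq_spec]
          exact pvGroup S0 E0 n ihn v rest ((e :: re).dropWhile (fun x => decide (x < v))) D
            (b - (((e :: re).takeWhile (fun x => decide (x < v))).length : Int)) bm pos hlen' hS
            (hE.sublist hE1_sub) hge hD hmem hinv'

-- evaluation of both programs on a single light (used for the length-1 branches of the claims)
lemma pvAlt_single (a r : Int) (t : List Int) :
    brightestPosition_alt [a :: r :: t] = if a + r < a - r then 0 else a - r := by
  unfold brightestPosition_alt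
  simp only [List.map_cons, List.map_nil, List.countP_cons, List.countP_nil]
  have e1 : PySem.List.pyGetD (a :: r :: t) 0 0 = a := by simp [PySem.List.pyGetD]
  have e2 : PySem.List.pyGetD (a :: r :: t) 1 0 = r := by simp [PySem.List.pyGetD]
  rw [e1, e2]
  rw [show (PySem.List.sorted (PySem.Set.ofList [a - r]) (fun x => x) false) = [a - r] from rfl]
  rw [List.foldl_cons, List.foldl_nil]
  by_cases h : a + r < a - r
  · simp [h]
  · simp [h]

lemma pvA_single (a r : Int) (t : List Int) :
    brightestPosition [a :: r :: t] = a - r := by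
  unfold brightestPosition
  simp [PySem.List.pyGetD]

-- ===== VERDICT (by name: the statement is the Claim_ definition above) =====
theorem brightestPosition_spec : Claim_equal_brightestPosition := by
  intro lights _ hpre
  unfold Spec_brightestPosition
  by_cases hlen : lights.length = 1
  · -- A's len == 1 shortcut; outside D_ it agrees with B
    rcases lights with _ | ⟨l, ls⟩
    · simp at hlen
    · have hls : ls = [] := by simpa using hlen
      subst hls
      have h2 : 2 ≤ l.length := hpre.1 l (List.mem_cons_self)
      rcases l with _ | ⟨a, _ | ⟨r, t⟩⟩
      · simp at h2
      · simp at h2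
      · have hr : 0 ≤ r := by simpa [List.getD] using hpre.2 rfl
        rw [pvA_single, pvAlt_single, if_neg (by omega)]
  · -- general case: A's sweep equals B's scan over the distinct start values
    unfold brightestPosition
    rw [if_neg hlen]
    simp only []
    rw [PySem.List.foldl_prod_mk
      (f := fun acc light => acc ++ [PySem.List.pyGetD light 0 0 - PySem.List.pyGetD light 1 0])
      (g := fun acc light => acc ++ [PySem.List.pyGetD light 0 0 + PySem.List.pyGetD light 1 0])]
    rw [PySem.List.foldl_append_singleton_eq_map, PySem.List.foldl_append_singleton_eq_map,
      List.nil_append, List.nil_append]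
    set fs := fun light : List Int => PySem.List.pyGetD light 0 0 - PySem.List.pyGetD light 1 0 with hfs
    set fe := fun light : List Int => PySem.List.pyGetD light 0 0 + PySem.List.pyGetD light 1 0 with hfe
    set S0 := lights.map fs with hS0
    set E0 := lights.map fe with hE0
    have hkey := pvLoopA_eq S0 E0 (PySem.List.sorted S0 (fun x => x) false).length
      (PySem.List.sorted S0 (fun x => x) false) (PySem.List.sorted E0 (fun x => x) false)
      (PySem.List.sorted (PySem.Set.ofList S0) (fun x => x) false) 0 0 0 le_rfl
      (by simpa using PySem.List.sorted_pairwise (xs := S0) (key := fun x => x))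
      (by simpa using PySem.List.sorted_pairwise (xs := E0) (key := fun x => x))
      (PySem.List.sorted_ofList_pairwise_lt S0)
      (by
        intro x
        rw [PySem.List.mem_sorted, PySem.List.mem_sorted, PySem.Set.mem_ofList])
      (by
        intro u _
        unfold pvF
        rw [(PySem.List.sorted_perm S0 (fun x => x) false).countP_eq,
          (PySem.List.sorted_perm E0 (fun x => x) false).countP_eq]
        ring)
    rw [hkey]
    unfold brightestPosition_alt
    simp only []
    congr 1
    apply PySem.List.foldl_congr_mem
    intro acc x _
    have hcS : lights.countP (fun light => decide (fs light ≤ x))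
        = S0.countP (fun s => decide (s ≤ x)) := by
      rw [hS0, List.countP_map]; rfl
    have hcE : lights.countP (fun light => decide (fe light < x))
        = E0.countP (fun e => decide (e < x)) := by
      rw [hE0, List.countP_map]; rfl
    unfold pvStep pvF
    rw [← hcS, ← hcE, hfs, hfe]
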